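-- pv_equiv track=rewrite | github.com/Ayan0054/awesome-go | min_op.py | min_op
-- ===== SOURCE A (Python) =====
-- def min_op(s, start, end):
--
--     # if the string is empty
--     if start > end:
--         return 0
--
--     # if the string has only one character
--     if start == end:
--         return 1
--
--     # if string has only two characters and both are same
--     if start + 1 == end and s[start] == s[end]:
--         return 1
--
--     # remove the first character and operate on the rest
--     res = 1 + min_op(s, start + 1, end)
--
--     # if the first two characters are same
--     if s[start] == s[start + 1]:
--         res = min(res, 1 + min_op(s, start + 2, end))
--
--     # find the index of the next character same as the first
--     for i in range(start + 2, end + 1):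
--         if s[start] == s[i]:
--             res = min(res, min_op(s, start + 1, i - 1) + min_op(s, i + 1, end))
--     return res
-- ===== SOURCE B (Python) =====
-- def min_op(s, start, end):
--     # Bottom-up interval DP table instead of A's top-down recursion.
--     if start > end:
--         return 0
--     dp = {}
--     for length in range(1, end - start + 2):
--         for i in range(start, end - length + 2):
--             j = i + length - 1
--             if i == j:
--                 res = 1
--             elif i + 1 == j and s[i] == s[j]:
--                 res = 1
--             else:
--                 res = 1 + (dp[(i + 1, j)] if i + 1 <= j else 0)
--                 if s[i] == s[i + 1]:
--                     res = min(res, 1 + (dp[(i + 2, j)] if i + 2 <= j else 0))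
--                 for k in range(i + 2, j + 1):
--                     if s[i] == s[k]:
--                         left = dp[(i + 1, k - 1)] if i + 1 <= k - 1 else 0
--                         res = min(res, left + (dp[(k + 1, j)] if k + 1 <= j else 0))
--             dp[(i, j)] = res
--     return dp[(start, end)]
-- ===== Notes on version B (the rewrite author's own statement) =====
-- stated objective: alternative
-- what changed: Replaces A's top-down interval recursion with an iterative bottom-up dynamic-programming table over intervals, filled by increasing length and read back at (start, end); B trades A's deep recursion for an explicit table.
import Mathlib
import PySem

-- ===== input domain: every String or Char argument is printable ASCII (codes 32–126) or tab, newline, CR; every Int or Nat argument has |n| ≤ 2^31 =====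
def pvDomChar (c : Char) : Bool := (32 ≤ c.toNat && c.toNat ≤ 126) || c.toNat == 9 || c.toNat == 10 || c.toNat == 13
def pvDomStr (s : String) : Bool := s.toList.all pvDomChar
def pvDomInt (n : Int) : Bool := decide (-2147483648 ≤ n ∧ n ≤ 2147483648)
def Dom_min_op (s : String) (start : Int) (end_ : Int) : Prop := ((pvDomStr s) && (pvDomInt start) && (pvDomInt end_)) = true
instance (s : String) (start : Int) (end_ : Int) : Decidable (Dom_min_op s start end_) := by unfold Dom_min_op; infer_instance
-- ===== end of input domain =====

-- B replaces A's top-down interval recursion by a bottom-up interval DP table (same values, different algorithm).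
-- Equivalence is about the RETURN value; neither program mutates its arguments.

-- ===== PORT A =====
-- s[i] (possibly negative index); the default is never reached inside Pre_min_op.
def sget (l : List Char) (i : Int) : Char := (PySem.List.pyGet? l i).getD ' '

-- A's recursion; the Nat fuel is only a totality guard (fuel (end-start+2) always suffices,
-- every recursive call shrinks the interval by at least one while fuel drops by one)
def min_op_fuel (fuel : Nat) (l : List Char) (start : Int) (end_ : Int) : Int :=
  match fuel with
  | 0 => 0
  | fuel + 1 =>
    if end_ < start then 0
    else if start = end_ then 1
    else if start + 1 = end_ ∧ sget l start = sget l end_ then 1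
    else
      let res := 1 + min_op_fuel fuel l (start + 1) end_
      let res := if sget l start = sget l (start + 1) then
          min res (1 + min_op_fuel fuel l (start + 2) end_) else res
      (PySem.List.pyRange (start + 2) (end_ + 1) 1).foldl
        (fun r i => if sget l start = sget l i then
            min r (min_op_fuel fuel l (start + 1) (i - 1) + min_op_fuel fuel l (i + 1) end_)
          else r) res

def min_op (s : String) (start : Int) (end_ : Int) : Int :=
  min_op_fuel (end_ - start + 2).toNat s.toList start end_

-- ===== PORT B =====
-- dp[(i,j)] if i <= j else 0
def dpget (dp : PySem.Dict (Int × Int) Int) (i : Int) (j : Int) : Int :=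
  if j < i then 0 else dp.getD (i, j) 0

-- one DP cell: A's recurrence read off the table
def cellB (l : List Char) (dp : PySem.Dict (Int × Int) Int) (i : Int) (j : Int) : Int :=
  if i = j then 1
  else if i + 1 = j ∧ sget l i = sget l j then 1
  else
    let res := 1 + dpget dp (i + 1) j
    let res := if sget l i = sget l (i + 1) then min res (1 + dpget dp (i + 2) j) else res
    (PySem.List.pyRange (i + 2) (j + 1) 1).foldl
      (fun r k => if sget l i = sget l k then
          min r (dpget dp (i + 1) (k - 1) + dpget dp (k + 1) j) else r) res

-- the inner 'for i in range(start, end-length+2)' loop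
def innerFold (l : List Char) (len : Int) (xs : List Int)
    (dp : PySem.Dict (Int × Int) Int) : PySem.Dict (Int × Int) Int :=
  xs.foldl (fun d i => d.insert (i, i + len - 1) (cellB l d i (i + len - 1))) dp

def min_op_alt (s : String) (start : Int) (end_ : Int) : Int :=
  if end_ < start then 0
  else
    let l := s.toList
    let dp := (PySem.List.pyRange 1 (end_ - start + 2) 1).foldl
      (fun d len => innerFold l len (PySem.List.pyRange start (end_ - len + 2) 1) d)
      PySem.Dict.empty
    dp.getD (start, end_) 0

-- ===== PRECONDITION & SPEC =====
-- Exactly where the Python A returns: with start < end it reads s[start..end], so all those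
-- indices must be valid (negative indices wrap); with end <= start it returns without touching s.
def Pre_min_op (s : String) (start : Int) (end_ : Int) : Prop :=
  end_ ≤ start ∨ (-(s.toList.length : Int) ≤ start ∧ end_ < (s.toList.length : Int))
instance (s : String) (start : Int) (end_ : Int) : Decidable (Pre_min_op s start end_) := by
  unfold Pre_min_op; infer_instance

def pvWitness_min_op : String × Int × Int := ("abcba", 0, 4)

def Spec_min_op (s : String) (start : Int) (end_ : Int) (out : Int) : Prop := out = min_op_alt s start end_
instance (s : String) (start : Int) (end_ : Int) (out : Int) : Decidable (Spec_min_op s start end_ out) := by unfold Spec_min_op; infer_instance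

-- ===== CLAIM (what is proved, stated in full; the proofs are below) =====
def Claim_equal_min_op : Prop := ∀ (s : String) (start : Int) (end_ : Int), Dom_min_op s start end_ → Pre_min_op s start end_ → Spec_min_op s start end_ (min_op s start end_)

-- ===== LEMMAS AND PROOFS =====

-- the fuel is irrelevant once it exceeds the interval length + 1
lemma min_op_fuel_eq : ∀ (n m : Nat) (l : List Char) (start end_ : Int),
    end_ - start + 2 ≤ (n : Int) → end_ - start + 2 ≤ (m : Int) →
    min_op_fuel n l start end_ = min_op_fuel m l start end_ := by
  intro n
  induction n with
  | zero =>
    intro m l start end_ hn _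
    have h : end_ < start := by omega
    cases m with
    | zero => rfl
    | succ m => simp only [min_op_fuel]; rw [if_pos h]
  | succ n ih =>
    intro m l start end_ hn hm
    cases m with
    | zero =>
      have h : end_ < start := by omega
      simp only [min_op_fuel]; rw [if_pos h]
    | succ m =>
      simp only [min_op_fuel]
      by_cases h0 : end_ < start
      · rw [if_pos h0, if_pos h0]
      rw [if_neg h0, if_neg h0]
      by_cases h1 : start = end_
      · rw [if_pos h1, if_pos h1]
      rw [if_neg h1, if_neg h1]
      rw [ih m l (start + 1) end_ (by omega) (by omega),
        ih m l (start + 2) end_ (by omega) (by omega)]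
      split_ifs
      · rfl
      all_goals {
        apply PySem.List.foldl_congr_mem
        intro acc i hi
        obtain ⟨hi1, hi2⟩ := (PySem.List.mem_pyRange_one).1 hi
        rw [ih m l (start + 1) (i - 1) (by omega) (by omega),
          ih m l (i + 1) end_ (by omega) (by omega)] }

-- A's recursion with a canonical (always sufficient) fuel
def goN (l : List Char) (start : Int) (end_ : Int) : Int :=
  min_op_fuel (end_ - start + 2).toNat l start end_

lemma goN_of_lt (l : List Char) (start end_ : Int) (h : end_ < start) : goN l start end_ = 0 := by
  unfold goN
  cases hk : (end_ - start + 2).toNat with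
  | zero => rfl
  | succ k => simp only [min_op_fuel]; rw [if_pos h]

lemma goN_of_eq (l : List Char) (start end_ : Int) (h : start = end_) : goN l start end_ = 1 := by
  unfold goN
  have hk : (end_ - start + 2).toNat = 2 := by omega
  rw [hk]
  simp only [min_op_fuel]
  rw [if_neg (by omega), if_pos h]

-- the interesting case, unfolded with canonical fuel at every recursive call
lemma goN_of_lt' (l : List Char) (start end_ : Int) (h : start < end_) :
    goN l start end_ =
      if start + 1 = end_ ∧ sget l start = sget l end_ then 1
      else
        let res := 1 + goN l (start + 1) end_
        let res := if sget l start = sget l (start + 1) then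
            min res (1 + goN l (start + 2) end_) else res
        (PySem.List.pyRange (start + 2) (end_ + 1) 1).foldl
          (fun r i => if sget l start = sget l i then
              min r (goN l (start + 1) (i - 1) + goN l (i + 1) end_) else r) res := by
  have hk : (end_ - start + 2).toNat = (end_ - start + 1).toNat + 1 := by omega
  unfold goN
  rw [hk]
  simp only [min_op_fuel]
  rw [if_neg (by omega), if_neg (by omega)]
  rw [min_op_fuel_eq (end_ - start + 1).toNat (end_ - (start + 1) + 2).toNat l (start + 1) end_
      (by omega) (by omega),
    min_op_fuel_eq (end_ - start + 1).toNat (end_ - (start + 2) + 2).toNat l (start + 2) end_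
      (by omega) (by omega)]
  split_ifs
  · rfl
  all_goals {
    apply PySem.List.foldl_congr_mem
    intro acc i hi
    obtain ⟨hi1, hi2⟩ := (PySem.List.mem_pyRange_one).1 hi
    rw [min_op_fuel_eq (end_ - start + 1).toNat ((i - 1) - (start + 1) + 2).toNat l (start + 1) (i - 1)
        (by omega) (by omega),
      min_op_fuel_eq (end_ - start + 1).toNat (end_ - (i + 1) + 2).toNat l (i + 1) end_
        (by omega) (by omega)] }

-- the DP cell computes A's recursion, given the shorter intervals in the table
lemma cellB_correct (l : List Char) (dp : PySem.Dict (Int × Int) Int) (i j : Int)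
    (hij : i ≤ j)
    (H : ∀ a b : Int, i ≤ a → b ≤ j → a ≤ b → b - a < j - i →
      dp.getD (a, b) 0 = goN l a b) :
    cellB l dp i j = goN l i j := by
  have hgo : ∀ a b : Int, i ≤ a → b ≤ j → b - a < j - i → dpget dp a b = goN l a b := by
    intro a b ha hb hlt
    by_cases hab : b < a
    · rw [dpget, if_pos hab, goN_of_lt l a b hab]
    · rw [dpget, if_neg hab]; exact H a b ha hb (by omega) hlt
  by_cases h1 : i = j
  · rw [cellB, if_pos h1, goN_of_eq l i j h1]
  rw [cellB, if_neg h1, goN_of_lt' l i j (by omega),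
    hgo (i + 1) j (by omega) le_rfl (by omega),
    hgo (i + 2) j (by omega) le_rfl (by omega)]
  split_ifs
  · rfl
  all_goals {
    apply PySem.List.foldl_congr_mem
    intro acc k hk
    obtain ⟨hk1, hk2⟩ := (PySem.List.mem_pyRange_one).1 hk
    rw [hgo (i + 1) (k - 1) (by omega) (by omega) (by omega),
      hgo (k + 1) j (by omega) le_rfl (by omega)] }

-- the table invariant: all intervals of length ≤ L inside [start, end_] are correct
def InvTab (l : List Char) (start end_ : Int) (dp : PySem.Dict (Int × Int) Int) (L : Int) : Prop :=
  ∀ a b : Int, start ≤ a → b ≤ end_ → a ≤ b → b - a + 1 ≤ L →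
    dp.getD (a, b) 0 = goN l a b

lemma innerFold_invariant (l : List Char) (start end_ : Int) (len : Int) (hlen : 1 ≤ len) :
    ∀ (xs : List Int) (dp : PySem.Dict (Int × Int) Int),
      InvTab l start end_ dp (len - 1) →
      InvTab l start end_ (innerFold l len xs dp) (len - 1) ∧
      (∀ a : Int, start ≤ a → a + len - 1 ≤ end_ →
        (dp.getD (a, a + len - 1) 0 = goN l a (a + len - 1) ∨ a ∈ xs) →
        (innerFold l len xs dp).getD (a, a + len - 1) 0 = goN l a (a + len - 1)) := by
  intro xs
  induction xs with
  | nil =>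
    intro dp hdp
    refine ⟨hdp, ?_⟩
    intro a _ _ hor
    rcases hor with h | h
    · exact h
    · exact absurd h (List.not_mem_nil)
  | cons x xs ih =>
    intro dp hdp
    have hstep : innerFold l len (x :: xs) dp =
        innerFold l len xs (dp.insert (x, x + len - 1) (cellB l dp x (x + len - 1))) := by
      simp only [innerFold, List.foldl_cons]
    -- a correct cell whenever its interval fits inside [start, end_]
    have hcell : ∀ a : Int, start ≤ a → a + len - 1 ≤ end_ →
        cellB l dp a (a + len - 1) = goN l a (a + len - 1) := by
      intro a ha hb
      apply cellB_correct l dp a (a + len - 1) (by omega)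
      intro a' b' ha' hb' hab' hlt'
      exact hdp a' b' (by omega) (by omega) hab' (by omega)
    have hdp1 : InvTab l start end_ (dp.insert (x, x + len - 1) (cellB l dp x (x + len - 1))) (len - 1) := by
      intro a b ha hb hab hL
      rw [PySem.Dict.getD_insert]
      split_ifs with he
      · exfalso
        have : a = x ∧ b = x + len - 1 := by
          constructor <;> [exact congrArg Prod.fst he; exact congrArg Prod.snd he]
        omega
      · exact hdp a b ha hb hab hL
    rw [hstep]
    refine ⟨(ih _ hdp1).1, ?_⟩
    intro a ha hb hor
    apply (ih _ hdp1).2 a ha hb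
    rcases hor with h | h
    · left
      rw [PySem.Dict.getD_insert]
      split_ifs with he
      · have hax : a = x := congrArg Prod.fst he
        subst hax
        exact hcell a ha hb
      · exact h
    · rcases List.mem_cons.1 h with h | h
      · subst h
        left
        rw [PySem.Dict.getD_insert, if_pos rfl]
        exact hcell a ha hb
      · right; exact h

lemma outer_invariant (l : List Char) (start end_ : Int) (N : Nat) :
    InvTab l start end_
      ((PySem.List.pyRange 1 ((N : Int) + 1) 1).foldl
        (fun d len => innerFold l len (PySem.List.pyRange start (end_ - len + 2) 1) d)
        PySem.Dict.empty) (N : Int) := by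
  induction N with
  | zero =>
    intro a b _ _ hab hL
    exfalso
    push_cast at hL
    omega
  | succ N ih =>
    have hsplit : PySem.List.pyRange 1 (((N + 1 : Nat) : Int) + 1) 1 =
        PySem.List.pyRange 1 ((N : Int) + 1) 1 ++ [(N : Int) + 1] := by
      have : ((N + 1 : Nat) : Int) + 1 = ((N : Int) + 1) + 1 := by push_cast; ring
      rw [this, PySem.List.pyRange_one_succ_right (by omega)]
    rw [hsplit, List.foldl_append, List.foldl_cons, List.foldl_nil]
    have hlen1 : ((N : Int) + 1) - 1 = (N : Int) := by ring
    have hinner := innerFold_invariant l start end_ ((N : Int) + 1) (by omega)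
      (PySem.List.pyRange start (end_ - ((N : Int) + 1) + 2) 1)
      ((PySem.List.pyRange 1 ((N : Int) + 1) 1).foldl
        (fun d len => innerFold l len (PySem.List.pyRange start (end_ - len + 2) 1) d)
        PySem.Dict.empty)
      (by rw [hlen1]; exact ih)
    intro a b ha hb hab hL
    by_cases hsmall : b - a + 1 ≤ (N : Int)
    · have := hinner.1 a b ha hb hab (by omega)
      exact this
    · obtain rfl : b = a + ((N : Int) + 1) - 1 := by push_cast at hL; omega
      apply hinner.2 a ha (by omega)
      right
      rw [PySem.List.mem_pyRange_one]
      omega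

-- ===== VERDICT (by name: the statement is the Claim_ definition above) =====
theorem min_op_spec : Claim_equal_min_op := by
  intro s start end_ _ _
  unfold Spec_min_op min_op min_op_alt
  by_cases h : end_ < start
  · rw [if_pos h]
    show goN s.toList start end_ = 0
    exact goN_of_lt s.toList start end_ h
  · rw [if_neg h]
    have h1 : start ≤ end_ := by omega
    have hN : end_ - start + 2 = ((end_ - start + 1).toNat : Int) + 1 := by omega
    have hout := outer_invariant s.toList start end_ (end_ - start + 1).toNat
    rw [← hN] at hout
    exact (hout start end_ le_rfl le_rfl h1 (by omega)).symm
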